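-- pv_equiv track=rewrite | github.com/csharpfritz/Taml | python/taml/parser.py | _is_array_parent
-- ===== SOURCE A (Python) =====
-- from typing import Any, Dict, List, Optional, Tuple, Union
--
-- TAB = '\t'
--
-- def _is_array_parent(lines: List[str], current_index: int, level: int) -> bool:
--     """Determine if a parent node should be an array or dict"""
--     has_list_items = False
--     has_key_value_pairs = False
--
--     for j in range(current_index + 1, len(lines)):
--         next_line = lines[j]
--
--         if not next_line.strip() or next_line.lstrip().startswith('#'):
--             continue
--
--         # Count indentation
--         next_indent = 0
--         for char in next_line:
--             if char == '\t':
--                 next_indent += 1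
--             else:
--                 break
--
--         # Stop if back to same or lower level
--         if next_indent < level + 1:
--             break
--
--         # Only check immediate children
--         if next_indent == level + 1:
--             next_content = next_line[next_indent:]
--             next_tab_idx = next_content.find(TAB)
--
--             if next_tab_idx > 0:
--                 # Has key-value with tab separator
--                 has_key_value_pairs = True
--             elif next_tab_idx == -1:
--                 # No tab - could be list item or parent node
--                 # Check if it has children
--                 has_children = _has_children(lines, j, next_indent)
--                 if not has_children:
--                     has_list_items = True
--
--     return has_list_items and not has_key_value_pairs
--
-- def _has_children(lines: List[str], current_index: int, level: int) -> bool: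
--     """Check if a line has children"""
--     for k in range(current_index + 1, len(lines)):
--         check_line = lines[k]
--
--         if not check_line.strip() or check_line.lstrip().startswith('#'):
--             continue
--
--         check_indent = 0
--         for char in check_line:
--             if char == '\t':
--                 check_indent += 1
--             else:
--                 break
--
--         if check_indent > level:
--             return True
--         elif check_indent <= level:
--             break
--
--     return False
-- ===== SOURCE B (Python) =====
-- TAB = '\t'
--
-- def _is_array_parent(lines, current_index, level):
--     """Determine if a parent node should be an array or dict.
--
--     Single pass: pre-collect (indent, content) of the content lines after
--     current_index, then classify immediate children with a one-entry lookahead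
--     instead of the repeated forward scans of a _has_children helper.
--     """
--     start = max(current_index + 1, 0)
--     entries = []
--     for line in lines[start:]:
--         if not line.strip() or line.lstrip().startswith('#'):
--             continue
--         indent = len(line) - len(line.lstrip(TAB))
--         entries.append((indent, line[indent:]))
--
--     has_list_items = False
--     has_key_value_pairs = False
--     for i, (indent, content) in enumerate(entries):
--         if indent < level + 1:
--             break
--         if indent == level + 1:
--             pos = content.find(TAB)
--             if pos > 0:
--                 has_key_value_pairs = True
--             elif pos == -1:
--                 if i + 1 >= len(entries) or entries[i + 1][0] <= level + 1:
--                     has_list_items = True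
--     return has_list_items and not has_key_value_pairs
-- ===== Notes on version B (the rewrite author's own statement) =====
-- stated objective: alternative
-- what changed: B pre-collects the (indent, content) pairs of the content lines after current_index in one pass and classifies immediate children with a single-entry lookahead, replacing the _has_children helper and its repeated forward scans.
-- outside the precondition, e.g. on _is_array_parent(['x', '\tla'], -2, 0): A returns True, B returns False
import Mathlib
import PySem

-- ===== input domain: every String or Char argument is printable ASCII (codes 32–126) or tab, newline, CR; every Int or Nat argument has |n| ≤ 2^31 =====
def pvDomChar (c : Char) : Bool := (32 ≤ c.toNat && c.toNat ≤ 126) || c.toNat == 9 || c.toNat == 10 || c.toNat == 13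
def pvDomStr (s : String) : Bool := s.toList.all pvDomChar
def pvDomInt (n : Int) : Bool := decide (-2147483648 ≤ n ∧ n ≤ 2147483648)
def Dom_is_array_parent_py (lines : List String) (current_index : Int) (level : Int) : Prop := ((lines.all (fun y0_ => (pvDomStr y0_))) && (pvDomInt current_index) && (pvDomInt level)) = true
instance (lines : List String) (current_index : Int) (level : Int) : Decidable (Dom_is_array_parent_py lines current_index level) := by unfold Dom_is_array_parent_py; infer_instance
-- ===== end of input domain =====

-- B replaces A's _has_children helper (repeated forward scans) by one pre-collection pass over the
-- content lines plus a single-entry lookahead; an alternative decomposition, not claimed faster.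


-- ===== PORT A =====
-- not line.strip() or line.lstrip().startswith('#')
def pvSkipA (l : List Char) : Bool :=
  (PySem.Chars.strip l).isEmpty || PySem.Chars.startswith (PySem.Chars.lstrip l) ['#']

-- A's leading-tab counting loop (for char in line: if tab +1 else break)
def pvCountTabsA : List Char → Nat
  | [] => 0
  | c :: rest => if c = '\t' then pvCountTabsA rest + 1 else 0

-- _has_children, as the structural recursion over the lines after current_index
def pvHasChildrenGo : List String → Int → Bool
  | [], _ => false
  | l :: rest, level =>
    if pvSkipA l.toList then pvHasChildrenGo rest level
    else if (pvCountTabsA l.toList : Int) > level then true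
    else false

-- the main j-loop of _is_array_parent over the lines after current_index
def pvIsArrayGo : List String → Int → Bool → Bool → Bool
  | [], _, hli, hkv => hli && !hkv
  | l :: rest, level, hli, hkv =>
    if pvSkipA l.toList then pvIsArrayGo rest level hli hkv
    else
      let ind := pvCountTabsA l.toList
      if (ind : Int) < level + 1 then hli && !hkv
      else if (ind : Int) = level + 1 then
        let content := l.toList.drop ind
        let tabIdx := PySem.Chars.find content ['\t']
        if tabIdx > 0 then pvIsArrayGo rest level hli true
        else if tabIdx = -1 then
          if !(pvHasChildrenGo rest (ind : Int)) then pvIsArrayGo rest level true hkv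
          else pvIsArrayGo rest level hli hkv
        else pvIsArrayGo rest level hli hkv
      else pvIsArrayGo rest level hli hkv

def is_array_parent_py (lines : List String) (current_index : Int) (level : Int) : Bool :=
  pvIsArrayGo (lines.drop (current_index + 1).toNat) level false false

-- ===== PORT B =====
-- not line.strip() or line.lstrip().startswith('#')
def pvSkipB (l : List Char) : Bool :=
  (PySem.Chars.strip l).isEmpty || PySem.Chars.startswith (PySem.Chars.lstrip l) ['#']

-- len(line) - len(line.lstrip('\t')); lstrip('\t') is exactly dropWhile (· == '\t')
def pvIndentB (l : List Char) : Nat := l.length - (l.dropWhile (· == '\t')).length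

-- the entry-collection pass of Source B: (indent, line[indent:]) for each content line
def pvEntries : List String → List (Nat × List Char)
  | [] => []
  | l :: rest =>
    if pvSkipB l.toList then pvEntries rest
    else (pvIndentB l.toList, l.toList.drop (pvIndentB l.toList)) :: pvEntries rest

-- Source B's classify loop with the one-entry lookahead (entries[i+1] = head of rest)
def pvClassify : List (Nat × List Char) → Int → Bool → Bool → Bool
  | [], _, hli, hkv => hli && !hkv
  | (ind, content) :: rest, level, hli, hkv =>
    if (ind : Int) < level + 1 then hli && !hkv
    else if (ind : Int) = level + 1 then
      let pos := PySem.Chars.find content ['\t']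
      if pos > 0 then pvClassify rest level hli true
      else if pos = -1 then
        if (match rest with | [] => true | (n, _) :: _ => decide ((n : Int) ≤ level + 1)) then
          pvClassify rest level true hkv
        else pvClassify rest level hli hkv
      else pvClassify rest level hli hkv
    else pvClassify rest level hli hkv

def is_array_parent_py_alt (lines : List String) (current_index : Int) (level : Int) : Bool :=
  pvClassify (pvEntries (lines.drop (max (current_index + 1) 0).toNat)) level false false

-- ===== PRECONDITION & SPEC =====
-- Pre_ excludes current_index < -1: there Python's range yields negative j and lines[j]
-- wraps around to lines before current_index (or raises IndexError), an accident of
-- negative indexing no caller of this parser helper relies on; B scans from index 0 there.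
def Pre_is_array_parent_py (lines : List String) (current_index : Int) (level : Int) : Prop :=
  -1 ≤ current_index
instance (lines : List String) (current_index : Int) (level : Int) : Decidable (Pre_is_array_parent_py lines current_index level) := by unfold Pre_is_array_parent_py; infer_instance

def pvWitness_is_array_parent_py : List String × Int × Int := (["item", "\tx"], 0, 0)

def Spec_is_array_parent_py (lines : List String) (current_index : Int) (level : Int) (out : Bool) : Prop := out = is_array_parent_py_alt lines current_index level
instance (lines : List String) (current_index : Int) (level : Int) (out : Bool) : Decidable (Spec_is_array_parent_py lines current_index level out) := by unfold Spec_is_array_parent_py; infer_instance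

-- ===== CLAIM (what is proved, stated in full; the proofs are below) =====
def Claim_equal_is_array_parent_py : Prop := ∀ (lines : List String) (current_index : Int) (level : Int), Dom_is_array_parent_py lines current_index level → Pre_is_array_parent_py lines current_index level → Spec_is_array_parent_py lines current_index level (is_array_parent_py lines current_index level)


-- ===== LEMMAS AND PROOFS =====

-- the two indentation computations agree
theorem pvIndentB_eq (l : List Char) : pvIndentB l = pvCountTabsA l := by
  induction l with
  | nil => rfl
  | cons c rest ih =>
    by_cases h : c = '\t'
    · have hb : (c == '\t') = true := by simp [h]
      have hle := List.length_dropWhile_le (p := fun c => c == '\t') (l := rest)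
      simp [pvIndentB, pvCountTabsA, List.dropWhile, h] at *
      omega
    · have hb : (c == '\t') = false := by simp [h]
      simp [pvIndentB, pvCountTabsA, List.dropWhile, hb, h]

-- _has_children looks exactly at the first collected entry
theorem pvHasChildrenGo_entries (ls : List String) (L : Int) :
    pvHasChildrenGo ls L =
      (match pvEntries ls with
       | [] => false
       | (n, _) :: _ => decide ((n : Int) > L)) := by
  induction ls with
  | nil => rfl
  | cons l rest ih =>
    rw [pvHasChildrenGo, pvEntries]
    by_cases h : pvSkipA l.toList
    · have h' : pvSkipB l.toList = true := h
      rw [if_pos h, if_pos h', ih]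
    · have h' : ¬ pvSkipB l.toList = true := h
      rw [if_neg h, if_neg h', pvIndentB_eq]
      by_cases hgt : (pvCountTabsA l.toList : Int) > L
      · rw [if_pos hgt]; simp [hgt]
      · rw [if_neg hgt]; simp [hgt]

-- main invariant: the j-loop of A equals B's classify over the collected entries
theorem pvGo_eq (ls : List String) : ∀ (level : Int) (hli hkv : Bool),
    pvIsArrayGo ls level hli hkv = pvClassify (pvEntries ls) level hli hkv := by
  induction ls with
  | nil => intro level hli hkv; rfl
  | cons l rest ih =>
    intro level hli hkv
    rw [pvIsArrayGo, pvEntries]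
    by_cases h : pvSkipA l.toList
    · have h' : pvSkipB l.toList = true := h
      rw [if_pos h, if_pos h', ih]
    · have h' : ¬ pvSkipB l.toList = true := h
      rw [if_neg h, if_neg h', pvIndentB_eq]
      simp only [pvClassify]
      by_cases h1 : (pvCountTabsA l.toList : Int) < level + 1
      · rw [if_pos h1, if_pos h1]
      · rw [if_neg h1, if_neg h1]
        by_cases h2 : (pvCountTabsA l.toList : Int) = level + 1
        · rw [if_pos h2, if_pos h2]
          by_cases h3 : 0 < PySem.Chars.find (l.toList.drop (pvCountTabsA l.toList)) ['\t']
          · rw [if_pos h3, if_pos h3, ih]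
          · rw [if_neg h3, if_neg h3]
            by_cases h4 : PySem.Chars.find (l.toList.drop (pvCountTabsA l.toList)) ['\t'] = -1
            · rw [if_pos h4, if_pos h4, h2, pvHasChildrenGo_entries rest (level + 1)]
              cases he : pvEntries rest with
              | nil => simp [ih, he]
              | cons e es =>
                obtain ⟨n, cs⟩ := e
                by_cases h5 : (n : Int) ≤ level + 1
                · have hn : ¬ ((n : Int) > level + 1) := by omega
                  simp [hn, h5, ih, he]
                · have hn : (n : Int) > level + 1 := by omega
                  simp [hn, h5, ih, he]
            · rw [if_neg h4, if_neg h4, ih]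
        · rw [if_neg h2, if_neg h2, ih]

-- ===== VERDICT (by name: the statement is the Claim_ definition above) =====
theorem is_array_parent_py_spec : Claim_equal_is_array_parent_py := by
  intro lines ci level _ hpre
  unfold Spec_is_array_parent_py is_array_parent_py is_array_parent_py_alt
  have hmax : max (ci + 1) 0 = ci + 1 := by
    unfold Pre_is_array_parent_py at hpre; omega
  rw [hmax, pvGo_eq]
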